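-- pv_equiv track=rewrite | github.com/Phosmic/regex-toolkit | tests/test_functions.py | is_sorted_by_len
-- ===== SOURCE A (Python) =====
-- from collections.abc import Iterable  # Generator
--
-- def is_sorted_by_len(texts: Iterable[str], reverse: bool = False) -> bool:
--     prev_len = None
--     for text in texts:
--         if prev_len is None:
--             prev_len = len(text)
--         if reverse:
--             if len(text) > prev_len:
--                 return False
--         else:
--             if len(text) < prev_len:
--                 return False
--         prev_len = len(text)
--     return True
-- ===== SOURCE B (Python) =====
-- def is_sorted_by_len(texts, reverse=False):
--     lens = [len(t) for t in texts]
--     return lens == sorted(lens, reverse=reverse)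
-- ===== Notes on version B (the rewrite author's own statement) =====
-- stated objective: simpler
-- what changed: Replaces the adjacent-pair scan with a running previous length by computing the length list once and comparing it to its own sort (reverse=reverse).
import Mathlib
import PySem

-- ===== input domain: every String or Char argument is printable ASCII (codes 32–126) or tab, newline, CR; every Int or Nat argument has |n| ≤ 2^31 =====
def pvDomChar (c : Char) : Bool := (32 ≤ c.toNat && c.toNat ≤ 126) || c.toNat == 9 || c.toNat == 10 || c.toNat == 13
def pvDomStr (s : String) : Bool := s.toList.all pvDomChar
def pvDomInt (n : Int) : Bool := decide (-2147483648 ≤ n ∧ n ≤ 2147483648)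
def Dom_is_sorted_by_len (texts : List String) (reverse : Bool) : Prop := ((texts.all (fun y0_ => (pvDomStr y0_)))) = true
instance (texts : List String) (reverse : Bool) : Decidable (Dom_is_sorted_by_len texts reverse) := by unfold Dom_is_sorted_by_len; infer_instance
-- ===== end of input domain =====

-- B replaces A's adjacent-pair scan with a running previous length by building the
-- length list once and comparing it to its own sort (reverse=reverse): simpler.

-- ===== PORT A =====
-- the loop of A: prev carries Python's prev_len (none = initial None)
def isSortedByLenLoop (reverse : Bool) (prev : Option Int) (texts : List String) : Bool :=
  match texts with
  | [] => true
  | t :: rest =>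
    let p : Int := match prev with
      | none => PySem.Str.len t
      | some p => p
    if reverse then
      if PySem.Str.len t > p then false
      else isSortedByLenLoop reverse (some (PySem.Str.len t)) rest
    else
      if PySem.Str.len t < p then false
      else isSortedByLenLoop reverse (some (PySem.Str.len t)) rest

def is_sorted_by_len (texts : List String) (reverse : Bool) : Bool :=
  isSortedByLenLoop reverse none texts

-- ===== PORT B =====
def is_sorted_by_len_alt (texts : List String) (reverse : Bool) : Bool :=
  let lens : List Int := texts.map (fun t => PySem.Str.len t)
  lens == PySem.List.sorted lens (fun x => x) reverse

-- ===== PRECONDITION & SPEC =====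
def Spec_is_sorted_by_len (texts : List String) (reverse : Bool) (out : Bool) : Prop := out = is_sorted_by_len_alt texts reverse
instance (texts : List String) (reverse : Bool) (out : Bool) : Decidable (Spec_is_sorted_by_len texts reverse out) := by unfold Spec_is_sorted_by_len; infer_instance

-- ===== CLAIM (what is proved, stated in full; the proofs are below) =====
def Claim_equal_is_sorted_by_len : Prop := ∀ (texts : List String) (reverse : Bool), Dom_is_sorted_by_len texts reverse → Spec_is_sorted_by_len texts reverse (is_sorted_by_len texts reverse)

-- ===== LEMMAS AND PROOFS =====

-- A's loop with prev = some p checks exactly the ≤-chain p :: lengths (ascending case)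
theorem loop_false_eq_chain (p : Int) (ts : List String) :
    isSortedByLenLoop false (some p) ts
      = decide (List.IsChain (· ≤ ·) (p :: ts.map (fun t => PySem.Str.len t))) := by
  induction ts generalizing p with
  | nil => simp [isSortedByLenLoop]
  | cons t rest ih =>
    simp only [isSortedByLenLoop, List.map_cons, List.isChain_cons_cons, PySem.Str.len]
    by_cases h : ((t.length : Int) < p)
    · simp [h, not_le.mpr h]
    · simp [h, ih, not_lt.mp h, PySem.Str.len]

-- descending case
theorem loop_true_eq_chain (p : Int) (ts : List String) :
    isSortedByLenLoop true (some p) ts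
      = decide (List.IsChain (fun a b => b ≤ a) (p :: ts.map (fun t => PySem.Str.len t))) := by
  induction ts generalizing p with
  | nil => simp [isSortedByLenLoop]
  | cons t rest ih =>
    simp only [isSortedByLenLoop, List.map_cons, List.isChain_cons_cons, PySem.Str.len]
    by_cases h : (p < (t.length : Int))
    · simp [h, not_le.mpr h]
    · simp [h, not_lt.mp h, ih, PySem.Str.len]

-- a list of Ints equals its ascending sort iff it is pairwise ≤
theorem eq_sorted_iff_pairwise (l : List Int) :
    (l = PySem.List.sorted l (fun x => x) false) ↔ l.Pairwise (· ≤ ·) := by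
  constructor
  · intro h
    rw [h]
    exact PySem.List.sorted_pairwise l (fun x => x)
  · intro h
    exact (PySem.List.sorted_eq_self_of_pairwise l (fun x => x) h).symm

-- a list of Ints equals its descending sort iff it is pairwise ≥
theorem eq_sorted_rev_iff_pairwise (l : List Int) :
    (l = PySem.List.sorted l (fun x => x) true) ↔ l.Pairwise (fun a b => b ≤ a) := by
  constructor
  · intro h
    rw [h]
    exact PySem.List.sorted_pairwise_rev l (fun x => x)
  · intro h
    exact (PySem.List.sorted_rev_eq_self_of_pairwise l (fun x => x) h).symm

-- ===== VERDICT (by name: the statement is the Claim_ definition above) =====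
theorem is_sorted_by_len_spec : Claim_equal_is_sorted_by_len := by
  intro texts reverse _
  unfold Spec_is_sorted_by_len is_sorted_by_len is_sorted_by_len_alt
  cases texts with
  | nil => cases reverse <;> simp [isSortedByLenLoop, PySem.List.sorted]
  | cons t rest =>
    have hfirst : ∀ (b : Bool), isSortedByLenLoop b none (t :: rest)
        = isSortedByLenLoop b (some (PySem.Str.len t)) rest := by
      intro b; cases b <;> simp [isSortedByLenLoop]
    cases reverse with
    | false =>
      rw [hfirst, loop_false_eq_chain]
      rw [show ((t :: rest).map (fun s => PySem.Str.len s))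
            = PySem.Str.len t :: rest.map (fun s => PySem.Str.len s) from rfl]
      rw [Bool.eq_iff_iff]
      simp only [decide_eq_true_eq, beq_iff_eq]
      constructor
      · intro hc
        exact (eq_sorted_iff_pairwise _).mpr hc.pairwise
      · intro he
        exact ((eq_sorted_iff_pairwise _).mp he).isChain
    | true =>
      rw [hfirst, loop_true_eq_chain]
      rw [show ((t :: rest).map (fun s => PySem.Str.len s))
            = PySem.Str.len t :: rest.map (fun s => PySem.Str.len s) from rfl]
      rw [Bool.eq_iff_iff]
      simp only [decide_eq_true_eq, beq_iff_eq]
      constructor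
      · intro hc
        exact (eq_sorted_rev_iff_pairwise _).mpr hc.pairwise
      · intro he
        exact ((eq_sorted_rev_iff_pairwise _).mp he).isChain
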